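-- pv_equiv track=rewrite | github.com/tkdlqm2/BackJoon-algorithm | 그리드/1.py | compareWord
-- ===== SOURCE A (Python) =====
-- def compareWord(input1,input2):
--     list = []
--     result = 0
--     j = 0
--     if len(input1) == len(input2): # 문자열의 길이가 같은 경우
--         for i in range(0,len(input1)):
--             if input1[i] == input2[i]:
--                 result += 1
--         return len(input2) - result
--
--     else:
--         while True:
--             result = 0
--             for i in range(0,len(input2)):
--                 try:
--                     if input1[i] == input2[i+j]:
--                         result += 1 # 문자가 겹치는 수
--                 except:
--                     continue
--             list.append(result)
--             if len(input1) + j == len(input2):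
--                 return len(input1) - max(list)
--             j += 1
-- ===== SOURCE B (Python) =====
-- def compareWord(input1, input2):
--     # Inverted index + diagonal counter: build a dict mapping each character of
--     # input2 to its positions, then scatter every matching (i, p) pair into a
--     # per-shift counter hits[p - i]; answer = len(input1) - max(hits).
--     pos = {}
--     for p, c in enumerate(input2):
--         pos.setdefault(c, []).append(p)
--     nsh = len(input2) - len(input1) + 1
--     hits = [0] * nsh
--     for i, c in enumerate(input1):
--         for p in pos.get(c, []):
--             j = p - i
--             if 0 <= j < nsh:
--                 hits[j] += 1
--     return len(input1) - max(hits)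
-- ===== Notes on version B (the rewrite author's own statement) =====
-- stated objective: alternative
-- what changed: A scans every (index, shift) pair with a try/except inner loop per shift and returns len1 - max of the collected per-shift match counts; B instead builds an inverted index (dict from each character of input2 to its position list), scatters each matching (i, p) pair into a per-shift counter hits[p - i], and returns len1 - max(hits), so no per-shift scan of the strings exists at all; it trades A's fixed len2-per-shift scan for work proportional to the number of matching character pairs (cheaper on diverse alphabets, dearer on duplicate-heavy strings).
import Mathlib
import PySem

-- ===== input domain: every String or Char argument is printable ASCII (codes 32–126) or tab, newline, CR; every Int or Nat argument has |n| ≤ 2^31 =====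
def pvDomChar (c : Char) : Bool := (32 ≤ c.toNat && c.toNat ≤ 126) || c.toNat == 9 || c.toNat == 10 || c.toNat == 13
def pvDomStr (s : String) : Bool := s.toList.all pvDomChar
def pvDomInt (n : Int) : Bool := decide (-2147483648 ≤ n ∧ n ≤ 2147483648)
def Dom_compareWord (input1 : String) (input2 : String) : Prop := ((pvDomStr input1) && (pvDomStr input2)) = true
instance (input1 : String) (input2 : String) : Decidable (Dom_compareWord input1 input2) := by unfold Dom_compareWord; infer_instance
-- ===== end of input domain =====

-- B replaces A's shift-by-shift try/except scanning with an inverted index (char → positions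
-- of input2) scattered into a per-shift match counter: an alternative algorithm whose work is
-- proportional to the number of matching character pairs instead of len2 × shifts (cheaper on
-- diverse alphabets, dearer on duplicate-heavy strings).

-- ===== PORT A =====
-- inner 'for i in range(0, len(input2))': an out-of-range index raises inside 'try' and is skipped
def cwInner (w1 w2 : List Char) (j : Int) : Int :=
  (PySem.List.pyRange 0 (w2.length : Int) 1).foldl (fun result i =>
    match PySem.List.pyGet? w1 i, PySem.List.pyGet? w2 (i + j) with
    | some a, some b => if a = b then result + 1 else result
    | _, _ => result) 0

-- the 'while True' loop; the fuel only makes it total (fuel exhaustion is unreachable under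
-- Pre_: with len(input1) > len(input2) the Python loop never terminates, and Pre_ excludes that)
def cwLoop (w1 w2 : List Char) : Nat → Nat → List Int → Int
  | 0, _, _ => 0
  | fuel+1, j, lst =>
    let result := cwInner w1 w2 (j : Int)
    let lst' := lst ++ [result]
    if w1.length + j = w2.length then
      (w1.length : Int) - ((PySem.List.max? lst' (fun x => x)).getD 0)
    else cwLoop w1 w2 fuel (j+1) lst'

def compareWord (input1 : String) (input2 : String) : Int :=
  let w1 := input1.toList
  let w2 := input2.toList
  if w1.length = w2.length then
    (w2.length : Int) - (PySem.List.pyRange 0 (w1.length : Int) 1).foldl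
      (fun result i => if PySem.List.pyGetD w1 i ' ' = PySem.List.pyGetD w2 i ' '
                       then result + 1 else result) 0
  else
    cwLoop w1 w2 (((w2.length : Int) - (w1.length : Int)).toNat + 1) 0 []

-- ===== PORT B =====
-- 'for p, c in enumerate(input2): pos.setdefault(c, []).append(p)' — the net effect on the
-- mapping is pos[c] = pos.get(c, []) + [p], i.e. Dict.modify c [] (· ++ [p])
def cwPos (w2 : List Char) : PySem.Dict Char (List Int) :=
  (PySem.List.enumerate w2).foldl (fun d q => d.modify q.2 [] (fun l => l ++ [q.1]))
    PySem.Dict.empty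

-- 'j = p - i; if 0 <= j < nsh: hits[j] += 1'
def cwBump (nsh : Int) (hits : List Int) (j : Int) : List Int :=
  if 0 ≤ j ∧ j < nsh then hits.set j.toNat (hits.getD j.toNat 0 + 1) else hits

-- Python's max(hits) raises on the empty list (only when len(input1) > len(input2), which is
-- outside Pre_): '.getD 0' is the totality guard
def compareWord_alt (input1 : String) (input2 : String) : Int :=
  let w1 := input1.toList
  let w2 := input2.toList
  let pos := cwPos w2
  let nsh : Int := (w2.length : Int) - (w1.length : Int) + 1
  let hits0 : List Int := List.replicate nsh.toNat 0
  let hits := (PySem.List.enumerate w1).foldl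
    (fun h q => (pos.getD q.2 []).foldl (fun h p => cwBump nsh h (p - q.1)) h) hits0
  (w1.length : Int) - (PySem.List.max? hits (fun x => x)).getD 0

-- ===== PRECONDITION & SPEC =====
-- Pre_ excludes len(input1) > len(input2): there A's 'while True' loop never reaches its exit
-- condition (Python diverges, A returns nothing), and B's max() of an empty list raises.
def Pre_compareWord (input1 : String) (input2 : String) : Prop :=
  PySem.Str.len input1 ≤ PySem.Str.len input2
instance (input1 : String) (input2 : String) : Decidable (Pre_compareWord input1 input2) := by
  unfold Pre_compareWord; infer_instance

def pvWitness_compareWord : String × String := ("ab", "cabd")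

def Spec_compareWord (input1 : String) (input2 : String) (out : Int) : Prop := out = compareWord_alt input1 input2
instance (input1 : String) (input2 : String) (out : Int) : Decidable (Spec_compareWord input1 input2 out) := by unfold Spec_compareWord; infer_instance

-- ===== CLAIM (what is proved, stated in full; the proofs are below) =====
def Claim_equal_compareWord : Prop := ∀ (input1 : String) (input2 : String), Dom_compareWord input1 input2 → Pre_compareWord input1 input2 → Spec_compareWord input1 input2 (compareWord input1 input2)

-- ===== LEMMAS AND PROOFS =====

-- match count of w1 laid over w2 at shift k
def cwMS (w1 w2 : List Char) (k : Nat) : Nat :=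
  (List.range w1.length).countP (fun i => decide (w1.getD i ' ' = w2.getD (i + k) ' '))

lemma cw_inner_eq (w1 w2 : List Char) (k : Nat) (h : w1.length + k ≤ w2.length) :
    cwInner w1 w2 (k : Int) = (cwMS w1 w2 k : Int) := by
  unfold cwInner cwMS
  rw [PySem.List.pyRange_zero_natCast, List.foldl_map]
  rw [PySem.List.foldl_congr_mem (List.range w2.length) _
      (fun result i => if i < w1.length ∧ w1.getD i ' ' = w2.getD (i + k) ' '
                       then result + 1 else result) 0 ?_]
  · rw [PySem.List.foldl_ite_add_one]
    have hsplit : w2.length = w1.length + (w2.length - w1.length) := by omega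
    rw [hsplit, List.range_add, List.countP_append]
    have h2 : (List.countP (fun i => decide (i < w1.length ∧ w1.getD i ' ' = w2.getD (i + k) ' '))
        (List.map (fun x => w1.length + x) (List.range (w2.length - w1.length)))) = 0 := by
      rw [List.countP_eq_zero]
      intro a ha
      simp only [List.mem_map] at ha
      obtain ⟨x, _, rfl⟩ := ha
      simp
    rw [h2]
    have h1 : (List.countP (fun i => decide (i < w1.length ∧ w1.getD i ' ' = w2.getD (i + k) ' '))
        (List.range w1.length)) = (List.countP (fun i => decide (w1.getD i ' ' = w2.getD (i + k) ' '))
        (List.range w1.length)) := by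
      apply List.countP_congr
      intro x hx
      simp only [List.mem_range] at hx
      simp [hx]
    rw [h1]; push_cast; ring
  · intro acc i hi
    simp only [List.mem_range] at hi
    by_cases hlt : i < w1.length
    · have hk : i + k < w2.length := by omega
      rw [show ((i : Int) + (k : Int)) = ((i + k : Nat) : Int) by push_cast; ring]
      rw [PySem.List.pyGet?_natCast, PySem.List.pyGet?_natCast,
          List.getElem?_eq_getElem hlt, List.getElem?_eq_getElem hk]
      simp only [List.getD_eq_getElem?_getD, List.getElem?_eq_getElem hlt,
        List.getElem?_eq_getElem hk, Option.getD_some]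
      simp [hlt]
    · have : w1[i]? = none := by simp; omega
      rw [PySem.List.pyGet?_natCast, this]
      simp [hlt]

lemma cw_loop_eq (w1 w2 : List Char) (h : w1.length < w2.length) :
    ∀ (d j : Nat) (lst : List Int), j + d = w2.length - w1.length →
    cwLoop w1 w2 (d + 1) j lst =
      (w1.length : Int) -
        ((PySem.List.max? (lst ++ (List.range (d + 1)).map
            (fun t => cwInner w1 w2 ((j + t : Nat) : Int))) (fun x => x)).getD 0) := by
  intro d
  induction d with
  | zero =>
    intro j lst hj
    have hcond : w1.length + j = w2.length := by omega
    simp only [cwLoop]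
    rw [if_pos hcond]
    simp [List.range_succ]
  | succ d ih =>
    intro j lst hj
    have hcond : ¬ (w1.length + j = w2.length) := by omega
    have hstep : cwLoop w1 w2 (d + 1 + 1) j lst
        = cwLoop w1 w2 (d + 1) (j + 1) (lst ++ [cwInner w1 w2 (j : Int)]) := by
      rw [cwLoop]
      simp only [if_neg hcond]
    rw [hstep, ih (j+1) (lst ++ [cwInner w1 w2 (j : Int)]) (by omega)]
    rw [List.append_assoc]
    congr 2
    conv_rhs => rw [List.range_succ_eq_map, List.map_cons, List.map_map]
    simp only [Nat.add_zero, List.singleton_append]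
    congr 2
    congr 1
    apply List.map_congr_left
    intro t _
    simp only [Function.comp_apply]
    congr 1
    omega

lemma cwBump_length (n : Int) (hits : List Int) (j : Int) :
    (cwBump n hits j).length = hits.length := by
  unfold cwBump; split <;> simp

lemma cwBump_fold_length (n : Int) (js : List Int) :
    ∀ (hits : List Int), (js.foldl (cwBump n) hits).length = hits.length := by
  induction js with
  | nil => intro hits; rfl
  | cons j js ih => intro hits; rw [List.foldl_cons, ih, cwBump_length]

lemma cwBump_getD (m : Nat) (hits : List Int) (j : Int) (k : Nat)
    (hlen : hits.length = m) (hk : k < m) :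
    (cwBump (m : Int) hits j).getD k 0
      = hits.getD k 0 + (if j = (k : Int) then 1 else 0) := by
  unfold cwBump
  by_cases hc : 0 ≤ j ∧ j < (m : Int)
  · rw [if_pos hc]
    simp only [List.getD_eq_getElem?_getD, List.getElem?_set]
    by_cases hjk : j = (k : Int)
    · have : j.toNat = k := by omega
      simp [hjk, hlen, hk]
    · have : j.toNat ≠ k := by omega
      simp [this, hjk]
  · rw [if_neg hc]
    have : ¬ j = (k : Int) := by omega
    simp [this]

lemma cwBump_fold_getD (m : Nat) (js : List Int) :
    ∀ (hits : List Int), hits.length = m → ∀ k, k < m →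
    (js.foldl (cwBump (m : Int)) hits).getD k 0
      = hits.getD k 0 + (js.count ((k : Nat) : Int) : Int) := by
  induction js with
  | nil => intro hits _ k _; simp
  | cons j js ih =>
    intro hits hlen k hk
    rw [List.foldl_cons, ih _ (by rw [cwBump_length]; exact hlen) k hk,
        cwBump_getD m hits j k hlen hk, List.count_cons]
    by_cases hjk : j = (k : Int)
    · simp [hjk]; ring
    · simp [hjk]

lemma cwPos_getD (w2 : List Char) (c : Char) :
    (cwPos w2).getD c []
      = ((PySem.List.enumerate w2).filter (fun q => q.2 == c)).map (fun q => q.1) := by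
  unfold cwPos
  have hswap : (PySem.List.enumerate w2).foldl
        (fun d q => d.modify q.2 [] (fun l => l ++ [q.1])) PySem.Dict.empty
      = ((PySem.List.enumerate w2).map Prod.swap).foldl
        (fun d p => d.modify p.1 [] (fun l => l ++ [p.2])) PySem.Dict.empty := by
    rw [List.foldl_map]
    rfl
  rw [hswap, PySem.Dict.getD_foldl_modify_append, PySem.Dict.getD_empty]
  simp only [List.nil_append, List.filter_map, List.map_map]
  rfl

lemma cwPos_count (w2 : List Char) (c : Char) (m : Nat) :
    ((cwPos w2).getD c []).count ((m : Nat) : Int)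
      = if m < w2.length ∧ w2.getD m ' ' = c then 1 else 0 := by
  rw [cwPos_getD]
  have hsub : (((PySem.List.enumerate w2).filter (fun q => q.2 == c)).map (fun q => q.1)).Sublist
      ((PySem.List.enumerate w2).map (fun q => q.1)) :=
    List.Sublist.map _ List.filter_sublist
  have hnodup : (((PySem.List.enumerate w2).filter (fun q => q.2 == c)).map (fun q => q.1)).Nodup := by
    apply List.Nodup.sublist hsub
    rw [PySem.List.map_fst_enumerate]
    simpa using PySem.List.nodup_pyRange_one 0 (0 + (w2.length : Int))
  have hmem : ((m : Nat) : Int) ∈ ((PySem.List.enumerate w2).filter (fun q => q.2 == c)).map (fun q => q.1)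
      ↔ (m < w2.length ∧ w2.getD m ' ' = c) := by
    simp only [List.mem_map, List.mem_filter, PySem.List.mem_enumerate_iff]
    constructor
    · rintro ⟨q, ⟨⟨kk, hkk, rfl⟩, hc⟩, hm⟩
      simp only [beq_iff_eq] at hc
      have : kk = m := by simpa using hm
      subst this
      exact ⟨hkk, by simp_all [List.getD_eq_getElem?_getD]⟩
    · rintro ⟨hm, hc⟩
      refine ⟨((m : Int), w2[m]), ⟨⟨m, hm, by simp⟩, ?_⟩, by simp⟩
      simp only [beq_iff_eq]
      rw [← hc]
      simp [List.getD_eq_getElem?_getD, List.getElem?_eq_getElem hm]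
  by_cases h : m < w2.length ∧ w2.getD m ' ' = c
  · rw [if_pos h]
    exact List.count_eq_one_of_mem hnodup (hmem.mpr h)
  · rw [if_neg h]
    exact List.count_eq_zero_of_not_mem (fun hx => h (hmem.mp hx))

lemma cwHits (w1 w2 : List Char) (hle : w1.length ≤ w2.length) :
    (PySem.List.enumerate w1).foldl
      (fun h q => ((cwPos w2).getD q.2 []).foldl
        (fun h p => cwBump ((w2.length : Int) - (w1.length : Int) + 1) h (p - q.1)) h)
      (List.replicate ((w2.length : Int) - (w1.length : Int) + 1).toNat 0)
    = (List.range (w2.length - w1.length + 1)).map (fun t => (cwMS w1 w2 t : Int)) := by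
  set nsh : Nat := w2.length - w1.length + 1 with hnsh
  have hcast : (w2.length : Int) - (w1.length : Int) + 1 = (nsh : Int) := by omega
  have htnat : ((w2.length : Int) - (w1.length : Int) + 1).toNat = nsh := by omega
  rw [hcast]
  simp only [Int.toNat_natCast]
  -- inner fold over positions = fold of cwBump over the shifted list; then flatten both folds
  have hinner : ∀ (h : List Int) (q : Int × Char),
      ((cwPos w2).getD q.2 []).foldl (fun h p => cwBump (nsh : Int) h (p - q.1)) h
      = (((cwPos w2).getD q.2 []).map (fun p => p - q.1)).foldl (cwBump (nsh : Int)) h := by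
    intro h q; rw [List.foldl_map]
  have hflat : (PySem.List.enumerate w1).foldl
      (fun h q => ((cwPos w2).getD q.2 []).foldl (fun h p => cwBump (nsh : Int) h (p - q.1)) h)
      (List.replicate nsh 0)
      = ((PySem.List.enumerate w1).flatMap
          (fun q => ((cwPos w2).getD q.2 []).map (fun p => p - q.1))).foldl
        (cwBump (nsh : Int)) (List.replicate nsh 0) := by
    rw [List.foldl_flatMap]
    congr 1
    funext h q
    exact hinner h q
  rw [hflat]
  set J : List Int := (PySem.List.enumerate w1).flatMap
      (fun q => ((cwPos w2).getD q.2 []).map (fun p => p - q.1)) with hJ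
  -- count of each shift in the event list J is the match count of that shift
  have hcount : ∀ k, k < nsh → J.count ((k : Nat) : Int) = cwMS w1 w2 k := by
    intro k hk
    rw [hJ, List.count_flatMap]
    have henum : PySem.List.enumerate w1
        = (List.range w1.length).map (fun i => (((i : Nat) : Int), w1.getD i ' ')) := by
      rw [PySem.List.enumerate_eq_map_pyRange w1 ' ']
      simp only [PySem.List.len]
      rw [PySem.List.pyRange_zero_natCast, List.map_map]
      apply List.map_congr_left
      intro i _
      simp [PySem.List.pyGetD_natCast]
    rw [henum, List.map_map]
    have hterm : ∀ i ∈ List.range w1.length,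
        ((List.count ((k : Nat) : Int) ∘ fun q => ((cwPos w2).getD q.2 []).map (fun p => p - q.1))
          ∘ fun i : Nat => (((i : Nat) : Int), w1.getD i ' ')) i
        = if w1.getD i ' ' = w2.getD (i + k) ' ' then 1 else 0 := by
      intro i hi
      simp only [List.mem_range] at hi
      simp only [Function.comp_apply]
      have hinj : Function.Injective (fun p : Int => p - (i : Int)) := by
        intro a b hab; simpa using hab
      have h1 : ((k : Nat) : Int) = (fun p : Int => p - (i : Int)) (((k + i : Nat) : Int)) := by
        push_cast; ring
      rw [h1, List.count_map_of_injective _ _ hinj, cwPos_count]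
      have hki : k + i < w2.length := by omega
      simp only [hki, true_and]
      by_cases hc : w1.getD i ' ' = w2.getD (i + k) ' '
      · rw [if_pos (by rw [Nat.add_comm k i, ← hc]), if_pos hc]
      · rw [if_neg (by rw [Nat.add_comm k i]; exact fun hx => hc hx.symm), if_neg hc]
    rw [List.map_congr_left hterm]
    unfold cwMS
    induction (List.range w1.length) with
    | nil => simp
    | cons a l ihl =>
      rw [List.map_cons, List.sum_cons, List.countP_cons, ihl]
      by_cases hc : w1.getD a ' ' = w2.getD (a + k) ' '
      · rw [if_pos hc, if_pos (by simpa using hc)]; ring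
      · rw [if_neg hc, if_neg (by simpa using hc)]; ring
  -- elementwise: both lists have length nsh and agree at every index
  apply List.ext_getElem
  · rw [cwBump_fold_length]; simp
  · intro k h1 h2
    have hk : k < nsh := by
      rw [cwBump_fold_length] at h1; simpa using h1
    have hlhs : (J.foldl (cwBump (nsh : Int)) (List.replicate nsh 0))[k]'h1
        = (J.foldl (cwBump (nsh : Int)) (List.replicate nsh 0)).getD k 0 := by
      rw [List.getD_eq_getElem?_getD, List.getElem?_eq_getElem h1]
      rfl
    rw [hlhs, cwBump_fold_getD nsh J (List.replicate nsh 0) (by simp) k hk, hcount k hk]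
    simp

-- ===== VERDICT (by name: the statement is the Claim_ definition above) =====
theorem compareWord_spec : Claim_equal_compareWord := by
  unfold Claim_equal_compareWord
  intro input1 input2 _ hpre
  unfold Spec_compareWord
  unfold Pre_compareWord at hpre
  have hlen : input1.toList.length ≤ input2.toList.length := by
    simp [PySem.Str.len] at hpre
    exact_mod_cast hpre
  simp only [compareWord, compareWord_alt]
  set w1 := input1.toList with hw1
  set w2 := input2.toList with hw2
  rw [cwHits w1 w2 hlen]
  by_cases heq : w1.length = w2.length
  · rw [if_pos heq]
    have hA : (PySem.List.pyRange 0 (w1.length : Int) 1).foldl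
        (fun result i => if PySem.List.pyGetD w1 i ' ' = PySem.List.pyGetD w2 i ' '
                         then result + 1 else result) 0 = (cwMS w1 w2 0 : Int) := by
      rw [PySem.List.pyRange_zero_natCast, List.foldl_map]
      rw [PySem.List.foldl_congr_mem (List.range w1.length) _
          (fun result i => if w1.getD i ' ' = w2.getD i ' ' then result + 1 else result) 0
          (by intro acc i _; simp [PySem.List.pyGetD_natCast])]
      rw [PySem.List.foldl_ite_add_one (p := fun i => w1.getD i ' ' = w2.getD i ' ')]
      unfold cwMS
      simp
    rw [hA]
    have h1 : w2.length - w1.length + 1 = 1 := by omega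
    rw [h1]
    simp only [List.range_one, List.map_cons, List.map_nil, PySem.List.max?_id_cons,
      List.foldl_nil, Option.getD_some]
    omega
  · rw [if_neg heq]
    have hlt : w1.length < w2.length := by omega
    have hfuel : ((w2.length : Int) - (w1.length : Int)).toNat = w2.length - w1.length := by omega
    rw [hfuel]
    rw [cw_loop_eq w1 w2 hlt (w2.length - w1.length) 0 [] (by omega)]
    simp only [List.nil_append, Nat.zero_add]
    have hmapA : (List.range (w2.length - w1.length + 1)).map
          (fun t : Nat => cwInner w1 w2 (t : Int))
        = (List.range (w2.length - w1.length + 1)).map (fun t => (cwMS w1 w2 t : Int)) := by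
      apply List.map_congr_left
      intro t ht
      simp only [List.mem_range] at ht
      exact cw_inner_eq w1 w2 t (by omega)
    rw [hmapA]
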